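-- pv_equiv track=rewrite | github.com/abdulmajid18/ds-2023-python | leetcode-bloomberg/two_pointer/two_sum.py | two_brute_force
-- ===== SOURCE A (Python) =====
-- def two_brute_force(elements: list, target: int):
--     for i in range(len(elements)):
--         for j in range(len(elements)):
--             if i == j:
--                 continue
--             number = abs(target - elements[i])
--             if elements[j] == number:
--                 return [i + 1, j + 1]
-- ===== SOURCE B (Python) =====
-- def two_brute_force(elements: list, target: int):
--     # one pass builds value -> first index and value -> second index,
--     # then one pass per i looks up the smallest j != i with elements[j] == abs(target - elements[i])
--     first = {}
--     second = {}
--     for idx, val in enumerate(elements):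
--         if val not in first:
--             first[val] = idx
--         elif val not in second:
--             second[val] = idx
--     for i, x in enumerate(elements):
--         v = abs(target - x)
--         j = first.get(v)
--         if j is not None and j == i:
--             j = second.get(v)
--         if j is not None:
--             return [i + 1, j + 1]
--     return None
-- ===== Notes on version B (the rewrite author's own statement) =====
-- stated objective: faster
-- what changed: replaces the nested O(n^2) index scan by a single hash pass recording the first two indices of each value, then a linear pass looking up the smallest j != i in O(1)
import Mathlib
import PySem

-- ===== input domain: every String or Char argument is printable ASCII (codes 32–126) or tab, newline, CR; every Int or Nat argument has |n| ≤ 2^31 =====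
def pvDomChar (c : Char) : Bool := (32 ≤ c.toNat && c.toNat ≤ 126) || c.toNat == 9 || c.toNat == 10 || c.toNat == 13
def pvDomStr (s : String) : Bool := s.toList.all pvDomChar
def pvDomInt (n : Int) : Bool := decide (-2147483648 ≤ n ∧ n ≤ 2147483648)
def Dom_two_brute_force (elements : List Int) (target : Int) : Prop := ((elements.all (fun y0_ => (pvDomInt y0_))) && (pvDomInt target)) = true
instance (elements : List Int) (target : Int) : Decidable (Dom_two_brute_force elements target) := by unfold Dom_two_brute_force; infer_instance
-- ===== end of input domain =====

-- B replaces A's nested index scan by a hash of the first two indices of each value plus one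
-- linear lookup pass (objective: faster); return value only — neither version mutates its input.

-- ===== PORT A =====
-- inner 'for j in range(len(elements))' loop; indices come from range(len(elements)), so pyGetD is exact
def pvAInner (elements : List Int) (target : Int) (i : Int) : List Int → Option (List Int)
  | [] => none
  | j :: js =>
    if i = j then pvAInner elements target i js
    else
      let number := |target - PySem.List.pyGetD elements i 0|
      if PySem.List.pyGetD elements j 0 = number then some [i + 1, j + 1]
      else pvAInner elements target i js

-- outer 'for i in range(len(elements))' loop
def pvAOuter (elements : List Int) (target : Int) : List Int → Option (List Int)
  | [] => none
  | i :: is =>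
    match pvAInner elements target i (PySem.List.pyRange 0 elements.length 1) with
    | some r => some r
    | none => pvAOuter elements target is

def two_brute_force (elements : List Int) (target : Int) : Option (List Int) :=
  pvAOuter elements target (PySem.List.pyRange 0 elements.length 1)

-- ===== PORT B =====
-- build pass: value -> first index ('first') and value -> second index ('second')
def pvBStep (st : PySem.Dict Int Int × PySem.Dict Int Int) (p : Int × Int) :
    PySem.Dict Int Int × PySem.Dict Int Int :=
  if st.1.contains p.2 = false then (st.1.insert p.2 p.1, st.2)
  else if st.2.contains p.2 = false then (st.1, st.2.insert p.2 p.1)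
  else st

-- lookup pass: per i, O(1) lookup of the smallest j != i with matching value
def pvBScan (fs ss : PySem.Dict Int Int) (target : Int) : List (Int × Int) → Option (List Int)
  | [] => none
  | (i, x) :: rest =>
    let v := |target - x|
    let j : Option Int :=
      match fs.get? v with
      | some j0 => if j0 = i then ss.get? v else some j0
      | none => none
    match j with
    | some j => some [i + 1, j + 1]
    | none => pvBScan fs ss target rest

def two_brute_force_alt (elements : List Int) (target : Int) : Option (List Int) :=
  let st := (PySem.List.enumerate elements 0).foldl pvBStep (PySem.Dict.empty, PySem.Dict.empty)
  pvBScan st.1 st.2 target (PySem.List.enumerate elements 0)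

-- ===== PRECONDITION & SPEC =====
def Spec_two_brute_force (elements : List Int) (target : Int) (out : Option (List Int)) : Prop := out = two_brute_force_alt elements target
instance (elements : List Int) (target : Int) (out : Option (List Int)) : Decidable (Spec_two_brute_force elements target out) := by unfold Spec_two_brute_force; infer_instance

-- ===== CLAIM (what is proved, stated in full; the proofs are below) =====
def Claim_equal_two_brute_force : Prop := ∀ (elements : List Int) (target : Int), Dom_two_brute_force elements target → Spec_two_brute_force elements target (two_brute_force elements target)

-- ===== LEMMAS AND PROOFS =====

-- A's inner loop finds the first index j ≠ i whose element equals |target - elements[i]|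
theorem pv_aInner_eq (elements : List Int) (target : Int) (i : Int) (js : List Int) :
    pvAInner elements target i js =
      ((js.filter (fun j => j ≠ i ∧ PySem.List.pyGetD elements j 0 =
          |target - PySem.List.pyGetD elements i 0|)).head?).map (fun j => [i + 1, j + 1]) := by
  rw [List.head?_filter]
  induction js with
  | nil => simp [pvAInner]
  | cons j js ih =>
    unfold pvAInner
    by_cases hij : i = j
    · rw [if_pos hij, List.find?_cons_of_neg (by simp [hij]), ih]
    · rw [if_neg hij]
      by_cases hv : PySem.List.pyGetD elements j 0 = |target - PySem.List.pyGetD elements i 0|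
      · rw [List.find?_cons_of_pos (by simp [hv]; exact fun h => hij h.symm)]
        simp [hv]
      · rw [List.find?_cons_of_neg (by simp [hv]), ← ih]
        simp [hv]

theorem pv_enumerate_eq (elements : List Int) :
    ∀ s : Int, PySem.List.enumerate elements s =
      (List.range elements.length).map (fun (k : Nat) => ((s + (k : Int), elements.getD k 0) : Int × Int)) := by
  induction elements with
  | nil => intro s; simp [PySem.List.enumerate_nil]
  | cons x xs ih =>
    intro s
    simp [PySem.List.enumerate_cons, ih (s + 1), List.range_succ_eq_map, List.map_map,
          Function.comp]
    intro a _; ring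

-- the increasing list of indices whose element equals v
def pvCand (elements : List Int) (v : Int) : List Int :=
  ((PySem.List.enumerate elements 0).filter (fun p => p.2 == v)).map (·.1)

theorem pv_cand_eq (elements : List Int) (v : Int) :
    pvCand elements v =
      (PySem.List.pyRange 0 elements.length 1).filter
        (fun j => PySem.List.pyGetD elements j 0 = v) := by
  unfold pvCand
  rw [pv_enumerate_eq, PySem.List.pyRange_zero_nat, List.filter_map, List.filter_map, List.map_map]
  have h1 : ((fun (p : Int × Int) => p.2 == v) ∘ fun (k : Nat) => ((0 + (k : Int), elements.getD k 0) : Int × Int))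
      = fun k => decide (elements.getD k 0 = v) := by funext k; exact beq_eq_decide _ _
  have h2 : ((fun j => decide (PySem.List.pyGetD elements j 0 = v)) ∘ fun (k : Nat) => (k : Int))
      = fun k => decide (elements.getD k 0 = v) := by funext k; simp
  have h3 : ((fun (p : Int × Int) => p.1) ∘ fun (k : Nat) => ((0 + (k : Int), elements.getD k 0) : Int × Int))
      = fun (k : Nat) => (k : Int) := by funext k; simp
  rw [h1, h2, h3]

theorem pv_cand_nodup (elements : List Int) (v : Int) : (pvCand elements v).Nodup := by
  rw [pv_cand_eq]
  exact List.filter_sublist.nodup (PySem.List.nodup_pyRange_one 0 elements.length)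

theorem pv_enum_pyRange (elements : List Int) :
    PySem.List.enumerate elements 0 =
      (PySem.List.pyRange 0 elements.length 1).map
        (fun i => (i, PySem.List.pyGetD elements i 0)) := by
  rw [pv_enumerate_eq, PySem.List.pyRange_zero_nat, List.map_map]
  simp [Function.comp]

-- the build pass records, per value v, the first and second index carrying v
theorem pv_build_spec (l : List (Int × Int)) :
    ∀ (fs ss : PySem.Dict Int Int) (v : Int),
      ((l.foldl pvBStep (fs, ss)).1.get? v,
       (l.foldl pvBStep (fs, ss)).2.get? v) =
      ((fs.get? v).or (((l.filter (fun p => p.2 == v)).map (·.1)).head?),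
       (ss.get? v).or (if (fs.get? v).isSome
          then ((l.filter (fun p => p.2 == v)).map (·.1)).head?
          else ((l.filter (fun p => p.2 == v)).map (·.1))[1]?)) := by
  induction l with
  | nil => intro fs ss v; simp
  | cons p l ih =>
    intro fs ss v
    rw [List.foldl_cons]
    by_cases hpv : p.2 = v
    · subst hpv
      by_cases hfs : fs.contains p.2 = false
      · rw [show pvBStep (fs, ss) p = (fs.insert p.2 p.1, ss) from by simp [pvBStep, hfs]]
        rw [ih]
        have hfsn : fs.get? p.2 = none := by
          rw [PySem.Dict.get?_eq_none_iff_contains]; exact hfs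
        simp [PySem.Dict.get?_insert_self, hfsn,
              ← List.head?_eq_getElem?, List.head?_filter]
      · obtain ⟨f0, hf0⟩ : ∃ f0, fs.get? p.2 = some f0 := by
          rw [PySem.Dict.contains_eq_isSome_get?] at hfs
          exact Option.ne_none_iff_exists'.mp (by simpa using hfs)
        by_cases hss : ss.contains p.2 = false
        · rw [show pvBStep (fs, ss) p = (fs, ss.insert p.2 p.1) from by simp [pvBStep, hfs, hss]]
          rw [ih]
          have hssn : ss.get? p.2 = none := by
            rw [PySem.Dict.get?_eq_none_iff_contains]; exact hss
          simp [PySem.Dict.get?_insert_self, hssn, hf0, List.head?_filter]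
        · rw [show pvBStep (fs, ss) p = (fs, ss) from by simp [pvBStep, hfs, hss]]
          rw [ih]
          obtain ⟨s0, hs0⟩ : ∃ s0, ss.get? p.2 = some s0 := by
            rw [PySem.Dict.contains_eq_isSome_get?] at hss
            exact Option.ne_none_iff_exists'.mp (by simpa using hss)
          simp [hf0, hs0]
    · have hne : v ≠ p.2 := fun h => hpv h.symm
      have h1 : (pvBStep (fs, ss) p).1.get? v = fs.get? v := by
        unfold pvBStep; split_ifs <;> simp [PySem.Dict.get?_insert, hne]
      have h2 : (pvBStep (fs, ss) p).2.get? v = ss.get? v := by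
        unfold pvBStep; split_ifs <;> simp [PySem.Dict.get?_insert, hne]
      rcases hst : pvBStep (fs, ss) p with ⟨fs', ss'⟩
      rw [hst] at h1 h2
      rw [ih fs' ss' v, h1, h2]
      simp [hpv]

-- in a duplicate-free list, the first entry ≠ i is the head unless the head is i
theorem pv_head_filter_ne (xs : List Int) (i : Int) (h : xs.Nodup) :
    (xs.filter (fun j => j ≠ i)).head? =
      match xs.head? with
      | none => none
      | some j0 => if j0 = i then xs[1]? else some j0 := by
  cases xs with
  | nil => simp
  | cons a t =>
    by_cases hai : a = i
    · subst hai
      have : List.filter (fun j => decide (j ≠ a)) t = t := by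
        apply List.filter_eq_self.mpr
        intro b hb; simp; rintro rfl; exact (List.nodup_cons.mp h).1 hb
      have h2 : List.filter (fun j => decide (j ≠ a)) (a :: t) = t := by
        rw [List.filter_cons, if_neg (by simp), this]
      rw [h2]
      cases t <;> simp
    · simp [hai]

-- ===== VERDICT (by name: the statement is the Claim_ definition above) =====
theorem two_brute_force_spec : Claim_equal_two_brute_force := by
  intro elements target _
  unfold Spec_two_brute_force two_brute_force two_brute_force_alt
  rcases hst : (PySem.List.enumerate elements 0).foldl pvBStep (PySem.Dict.empty, PySem.Dict.empty)
    with ⟨fs, ss⟩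
  have hdict : ∀ v, fs.get? v = (pvCand elements v).head? ∧ ss.get? v = (pvCand elements v)[1]? := by
    intro v
    have h := pv_build_spec (PySem.List.enumerate elements 0) PySem.Dict.empty PySem.Dict.empty v
    rw [hst] at h
    simpa [pvCand, Prod.ext_iff] using h
  have perI : ∀ i : Int,
      pvAInner elements target i (PySem.List.pyRange 0 elements.length 1) =
      (match fs.get? (|target - PySem.List.pyGetD elements i 0|) with
       | some j0 => if j0 = i then ss.get? (|target - PySem.List.pyGetD elements i 0|) else some j0
       | none => none).map (fun j => [i + 1, j + 1]) := by
    intro i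
    rw [pv_aInner_eq]
    have hfil : (PySem.List.pyRange 0 elements.length 1).filter
        (fun j => decide (j ≠ i ∧ PySem.List.pyGetD elements j 0 = |target - PySem.List.pyGetD elements i 0|)) =
        (pvCand elements (|target - PySem.List.pyGetD elements i 0|)).filter (fun j => j ≠ i) := by
      rw [pv_cand_eq, List.filter_filter]
      apply List.filter_congr; intro a _; simp
    rw [hfil, pv_head_filter_ne _ _ (pv_cand_nodup elements _)]
    rw [(hdict _).1, (hdict _).2]
    cases (pvCand elements (|target - PySem.List.pyGetD elements i 0|)).head? <;> rfl
  have main : ∀ ks : List Int,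
      pvAOuter elements target ks =
      pvBScan fs ss target (ks.map (fun i => (i, PySem.List.pyGetD elements i 0))) := by
    intro ks
    induction ks with
    | nil => simp [pvAOuter, pvBScan]
    | cons i ks ih =>
      simp only [List.map_cons]
      show (match pvAInner elements target i (PySem.List.pyRange 0 elements.length 1) with
            | some r => some r
            | none => pvAOuter elements target ks) =
          (match (match fs.get? (|target - PySem.List.pyGetD elements i 0|) with
                  | some j0 => if j0 = i then ss.get? (|target - PySem.List.pyGetD elements i 0|) else some j0
                  | none => none) with
            | some j => some [i + 1, j + 1]
            | none => pvBScan fs ss target (ks.map (fun i => (i, PySem.List.pyGetD elements i 0))))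
      rw [perI i]
      cases h : fs.get? (|target - PySem.List.pyGetD elements i 0|) with
      | none => exact ih
      | some j0 =>
        by_cases hji : j0 = i
        · cases hss2 : ss.get? (|target - PySem.List.pyGetD elements i 0|) <;> simp [hji, ih]
        · simp [hji]
  rw [pv_enum_pyRange, main]
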